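-- pv_equiv track=rewrite | github.com/PennyroyalTea/bioinformatics-homeworks | homework_2022.05.20/9.9.11.py | add_indices
-- ===== SOURCE A (Python) =====
-- def add_indices(s):
-- 	count = dict()
-- 	res = []
-- 	for c in s:
-- 		if not c in count:
-- 			count[c] = 0
-- 		res.append((c, count[c]))
-- 		count[c] += 1
-- 	return res
-- ===== SOURCE B (Python) =====
-- def add_indices(s):
--     lst = list(s)
--     return [(lst[i], lst[:i].count(lst[i])) for i in range(len(lst))]
-- ===== Notes on version B (the rewrite author's own statement) =====
-- stated objective: alternative
-- what changed: Replaces the running-count dict pass with an index comprehension that recomputes each occurrence index as the count of equal elements in the prefix lst[:i].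
import Mathlib
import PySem

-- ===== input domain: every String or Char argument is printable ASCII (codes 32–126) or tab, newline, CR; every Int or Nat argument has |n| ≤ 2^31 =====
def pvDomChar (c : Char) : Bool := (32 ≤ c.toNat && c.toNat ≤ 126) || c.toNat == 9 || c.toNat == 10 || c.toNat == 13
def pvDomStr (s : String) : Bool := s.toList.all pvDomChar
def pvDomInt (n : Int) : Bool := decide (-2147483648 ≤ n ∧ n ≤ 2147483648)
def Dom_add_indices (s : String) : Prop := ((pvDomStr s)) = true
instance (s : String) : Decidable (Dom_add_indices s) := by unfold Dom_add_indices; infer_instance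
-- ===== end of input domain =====

-- B replaces A's running-count dict with an index comprehension that recounts each prefix (alternative decomposition, not faster).

-- ===== PORT A =====
-- A: one pass keeping a dict of running counts; appends (c, count[c]) then increments.
def add_indices (s : String) : List (String × Int) :=
  (s.toList.foldl
    (fun (st : PySem.Dict Char Int × List (String × Int)) c =>
      let count := if st.1.contains c then st.1 else st.1.insert c 0
      let v := count.getD c 0
      (count.insert c (v + 1), st.2 ++ [(String.ofList [c], v)]))
    (PySem.Dict.empty, [])).2

-- ===== PORT B =====
-- B: lst = list(s); [(lst[i], lst[:i].count(lst[i])) for i in range(len(lst))]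
def add_indices_alt (s : String) : List (String × Int) :=
  let lst := s.toList
  (List.range lst.length).map
    (fun i => (String.ofList [lst.getD i ' '], ((lst.take i).count (lst.getD i ' ') : Int)))

-- ===== PRECONDITION & SPEC =====
def Spec_add_indices (s : String) (out : List (String × Int)) : Prop := out = add_indices_alt s
instance (s : String) (out : List (String × Int)) : Decidable (Spec_add_indices s out) := by unfold Spec_add_indices; infer_instance

-- ===== CLAIM (what is proved, stated in full; the proofs are below) =====
def Claim_equal_add_indices : Prop := ∀ (s : String), Dom_add_indices s → Spec_add_indices s (add_indices s)

-- ===== LEMMAS AND PROOFS =====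

-- canonical recursive form shared by both proofs: pre is the already-processed prefix
def pvCanon (pre rest : List Char) : List (String × Int) :=
  match rest with
  | [] => []
  | c :: t => (String.ofList [c], (pre.count c : Int)) :: pvCanon (pre ++ [c]) t

-- A's fold equals acc ++ pvCanon pre rest, given the dict holds the counts of pre
lemma pvA_loop (rest : List Char) (pre : List Char) (d : PySem.Dict Char Int)
    (acc : List (String × Int))
    (h : ∀ c, d.getD c 0 = (pre.count c : Int)) :
    (rest.foldl
      (fun (st : PySem.Dict Char Int × List (String × Int)) c =>
        let count := if st.1.contains c then st.1 else st.1.insert c 0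
        let v := count.getD c 0
        (count.insert c (v + 1), st.2 ++ [(String.ofList [c], v)]))
      (d, acc)).2 = acc ++ pvCanon pre rest := by
  induction rest generalizing pre d acc with
  | nil => simp [pvCanon]
  | cons c t ih =>
    simp only [List.foldl_cons, pvCanon]
    have hv : (if d.contains c then d else d.insert c 0).getD c 0 = (pre.count c : Int) := by
      by_cases hc : d.contains c
      · simp [hc, h c]
      · have h0 : d.getD c 0 = 0 := PySem.Dict.getD_of_not_contains _ _ (by simpa using hc)
        have := h c
        rw [h0] at this
        simp [hc, PySem.Dict.getD_insert_self, ← this]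
    rw [hv]
    rw [ih (pre ++ [c]) _ _ ?_]
    · simp
    · intro c'
      by_cases hcc : c' = c
      · subst hcc
        simp [List.count_append]
      · by_cases hc : d.contains c <;>
          simp [hc, PySem.Dict.getD_insert, hcc, h c', List.count_append, Ne.symm hcc]

-- B's range-map equals pvCanon with the prefix prepended to the counted slice
lemma pvB_eq_canon (t : List Char) (pre : List Char) :
    pvCanon pre t = (List.range t.length).map
      (fun i => (String.ofList [t.getD i ' '], (((pre ++ t.take i).count (t.getD i ' ') : Int)))) := by
  induction t generalizing pre with
  | nil => simp [pvCanon]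
  | cons c t ih =>
    simp only [pvCanon, List.length_cons, List.range_succ_eq_map, List.map_cons, List.map_map]
    refine congrArg₂ (· :: ·) (by simp) ?_
    rw [ih (pre ++ [c])]
    apply List.map_congr_left
    intro i _
    simp [List.append_assoc]

-- ===== VERDICT (by name: the statement is the Claim_ definition above) =====
theorem add_indices_spec : Claim_equal_add_indices := by
  intro s _
  show add_indices s = add_indices_alt s
  unfold add_indices add_indices_alt
  rw [pvA_loop s.toList [] PySem.Dict.empty [] (fun c => by simp)]
  rw [pvB_eq_canon s.toList []]
  simp
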